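-- pv_equiv track=rewrite | github.com/AuScope/AuScope-instrument-registry | ckan/src/ckanext-pidinst-theme/ckanext/pidinst_theme/logic/validators.py | _parse_composite_from_extras
-- ===== SOURCE A (Python) =====
-- def _parse_composite_from_extras(key, data):
--     """
--     Extract composite repeating rows from __extras (scheming composite pattern).
--     Returns (found_list, extras_to_delete, extras_dict)
--     """
--     found = {}
--     prefix = key[-1] + "-"
--     extras_key = key[:-1] + ("__extras",)
--     extras = data.get(extras_key, {})
--
--     extras_to_delete = []
--     for name, text in list(extras.items()):
--         if not name.startswith(prefix):
--             continue
--
--         # name format: "{field}-{index}-{subfield}"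
--         # eg: "owner-1-owner_name"
--         parts = name.split("-", 2)
--         if len(parts) != 3:
--             continue
--
--         index = int(parts[1])
--         subfield = parts[2]
--         extras_to_delete.append(name)
--
--         found.setdefault(index, {})
--         found[index][subfield] = text
--
--     found_list = [row for _, row in sorted(found.items(), key=lambda kv: kv[0])]
--     return found, found_list, extras_to_delete, extras
-- ===== SOURCE B (Python) =====
-- def _parse_composite_from_extras(key, data):
--     extras = data.get(key[:-1] + ("__extras",), {})
--     prefix = key[-1] + "-"
--     triples = []
--     extras_to_delete = []
--     for name, text in extras.items():
--         if name.startswith(prefix):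
--             parts = name.split("-", 2)
--             if len(parts) == 3:
--                 triples.append((int(parts[1]), parts[2], text))
--                 extras_to_delete.append(name)
--     indices = []
--     for i, _s, _t in triples:
--         if i not in indices:
--             indices.append(i)
--     found = {i: {s: t for j, s, t in triples if j == i} for i in indices}
--     found_list = [found[i] for i in sorted(indices)]
--     return found, found_list, extras_to_delete, extras
-- ===== Notes on version B (the rewrite author's own statement) =====
-- stated objective: alternative
-- what changed: A builds the index->row dict incrementally with setdefault inside the scan; B first extracts a flat (index, subfield, text) match list in one filtering pass, then dedups the indices in first-occurrence order and builds each row by a per-index comprehension over the match list, taking found_list from the sorted index list.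
import Mathlib
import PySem

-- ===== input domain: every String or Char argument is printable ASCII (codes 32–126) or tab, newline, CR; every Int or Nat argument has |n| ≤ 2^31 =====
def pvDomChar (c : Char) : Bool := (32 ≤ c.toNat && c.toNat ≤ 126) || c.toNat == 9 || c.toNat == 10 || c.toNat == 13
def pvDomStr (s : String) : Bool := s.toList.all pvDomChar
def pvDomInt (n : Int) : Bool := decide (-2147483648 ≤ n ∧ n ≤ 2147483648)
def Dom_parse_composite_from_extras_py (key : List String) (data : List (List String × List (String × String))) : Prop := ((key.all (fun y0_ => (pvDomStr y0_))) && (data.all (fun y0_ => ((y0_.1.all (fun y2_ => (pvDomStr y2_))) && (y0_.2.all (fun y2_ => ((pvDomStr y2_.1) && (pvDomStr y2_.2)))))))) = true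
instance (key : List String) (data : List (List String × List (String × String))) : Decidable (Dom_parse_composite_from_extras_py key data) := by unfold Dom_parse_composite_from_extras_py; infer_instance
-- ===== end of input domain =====

-- B restructures A's single accumulate-into-dict scan as: one filtering pass extracting a flat
-- (index, subfield, text) match list, then first-occurrence index dedup and per-index grouping
-- (objective: alternative decomposition; not claimed faster).

-- shared input-reading helpers (prefix string and the __extras dict of the input)
def pvPrefix (key : List String) : String := PySem.List.pyGetD key (-1) "" ++ "-"

def pvExtras (key : List String) (data : List (List String × List (String × String))) : List (String × String) :=
  (PySem.Dict.mk data).getD (PySem.List.slice key none (some (-1)) ++ ["__extras"]) []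

-- ===== PORT A =====
def pvAStep (pre : String) (st : PySem.Dict Int (PySem.Dict String String) × List String)
    (p : String × String) : PySem.Dict Int (PySem.Dict String String) × List String :=
  if PySem.Str.startswith p.1 pre then
    let parts := (PySem.Str.splitMax? p.1 "-" 2).getD []
    if parts.length = 3 then
      let index := (PySem.Int.ofStr? (PySem.List.pyGetD parts 1 "")).getD 0
      let subfield := PySem.List.pyGetD parts 2 ""
      let found1 := st.1.setdefault index PySem.Dict.empty
      (found1.insert index (((found1.get? index).getD PySem.Dict.empty).insert subfield p.2),
       st.2 ++ [p.1])
    else st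
  else st

def parse_composite_from_extras_py (key : List String) (data : List (List String × List (String × String))) : (List (Int × List (String × String))) × (List (List (String × String))) × List String × (List (String × String)) :=
  let pre := pvPrefix key
  let extras := pvExtras key data
  let st := extras.foldl (pvAStep pre) (PySem.Dict.empty, [])
  let found_list := (PySem.List.sorted st.1.items (fun kv => kv.1) false).map (fun kv => kv.2.items)
  (st.1.items.map (fun kv => (kv.1, kv.2.items)), found_list, st.2, extras)

-- ===== PORT B =====
def pvBStep (pre : String) (acc : List (Int × String × String) × List String)
    (p : String × String) : List (Int × String × String) × List String :=
  if PySem.Str.startswith p.1 pre then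
    let parts := (PySem.Str.splitMax? p.1 "-" 2).getD []
    if parts.length = 3 then
      (acc.1 ++ [((PySem.Int.ofStr? (PySem.List.pyGetD parts 1 "")).getD 0,
                  PySem.List.pyGetD parts 2 "", p.2)],
       acc.2 ++ [p.1])
    else acc
  else acc

-- {s: t for j, s, t in triples if j == i}
def pvRow (i : Int) (triples : List (Int × String × String)) : PySem.Dict String String :=
  triples.foldl (fun r t => if t.1 == i then r.insert t.2.1 t.2.2 else r) PySem.Dict.empty

def parse_composite_from_extras_py_alt (key : List String) (data : List (List String × List (String × String))) : (List (Int × List (String × String))) × (List (List (String × String))) × List String × (List (String × String)) :=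
  let extras := pvExtras key data
  let pre := pvPrefix key
  let acc := extras.foldl (pvBStep pre) ([], [])
  let indices := acc.1.foldl (fun ix (t : Int × String × String) => if ix.contains t.1 then ix else ix ++ [t.1]) ([] : List Int)
  let found := indices.map (fun i => (i, (pvRow i acc.1).items))
  let found_list := (PySem.List.sorted indices (fun x => x) false).map
      (fun i => ((PySem.Dict.mk found).get? i).getD [])
  (found, found_list, acc.2, extras)

-- ===== PRECONDITION & SPEC =====
-- Pre_ excludes exactly the inputs where A raises: empty key (IndexError on key[-1]) and a
-- matching extras name whose middle split part is not int()-parsable (ValueError).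
def Pre_parse_composite_from_extras_py (key : List String) (data : List (List String × List (String × String))) : Prop :=
  key ≠ [] ∧ ∀ p ∈ pvExtras key data,
    PySem.Str.startswith p.1 (pvPrefix key) = true →
    ((PySem.Str.splitMax? p.1 "-" 2).getD []).length = 3 →
    (PySem.Int.ofStr? (PySem.List.pyGetD ((PySem.Str.splitMax? p.1 "-" 2).getD []) 1 "")).isSome = true

instance (key : List String) (data : List (List String × List (String × String))) : Decidable (Pre_parse_composite_from_extras_py key data) := by
  unfold Pre_parse_composite_from_extras_py; infer_instance

def pvWitness_parse_composite_from_extras_py : List String × (List (List String × List (String × String))) :=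
  (["owner"], [(["__extras"], [("owner-1-name", "Ada"), ("owner-2-name", "Bob"), ("owner-1-mail", "x")])])

def Spec_parse_composite_from_extras_py (key : List String) (data : List (List String × List (String × String))) (out : (List (Int × List (String × String))) × (List (List (String × String))) × List String × (List (String × String))) : Prop := out = parse_composite_from_extras_py_alt key data
instance (key : List String) (data : List (List String × List (String × String))) (out : (List (Int × List (String × String))) × (List (List (String × String))) × List String × (List (String × String))) : Decidable (Spec_parse_composite_from_extras_py key data out) := by unfold Spec_parse_composite_from_extras_py; infer_instance

-- ===== CLAIM (what is proved, stated in full; the proofs are below) =====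
def Claim_equal_parse_composite_from_extras_py : Prop := ∀ (key : List String) (data : List (List String × List (String × String))), Dom_parse_composite_from_extras_py key data → Pre_parse_composite_from_extras_py key data → Spec_parse_composite_from_extras_py key data (parse_composite_from_extras_py key data)

-- ===== LEMMAS AND PROOFS =====

-- the flat match list and the matched-name list of a scan
def pvMatch (pre : String) (p : String × String) : Option (Int × String × String) :=
  if PySem.Str.startswith p.1 pre then
    let parts := (PySem.Str.splitMax? p.1 "-" 2).getD []
    if parts.length = 3 then
      some ((PySem.Int.ofStr? (PySem.List.pyGetD parts 1 "")).getD 0, PySem.List.pyGetD parts 2 "", p.2)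
    else none
  else none

def pvT (pre : String) (extras : List (String × String)) : List (Int × String × String) :=
  extras.filterMap (pvMatch pre)

def pvN (pre : String) (extras : List (String × String)) : List String :=
  extras.filterMap (fun p => (pvMatch pre p).map (fun _ => p.1))

def pvGstep (d : PySem.Dict Int (PySem.Dict String String)) (m : Int × String × String) :
    PySem.Dict Int (PySem.Dict String String) :=
  let found1 := d.setdefault m.1 PySem.Dict.empty
  found1.insert m.1 (((found1.get? m.1).getD PySem.Dict.empty).insert m.2.1 m.2.2)

def pvIdx (triples : List (Int × String × String)) : List Int :=
  triples.foldl (fun ix (t : Int × String × String) => if ix.contains t.1 then ix else ix ++ [t.1]) ([] : List Int)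

theorem pvAfold (pre : String) (extras : List (String × String)) :
    ∀ (d : PySem.Dict Int (PySem.Dict String String)) (l : List String),
      extras.foldl (pvAStep pre) (d, l) = ((pvT pre extras).foldl pvGstep d, l ++ pvN pre extras) := by
  induction extras with
  | nil => intro d l; simp [pvT, pvN]
  | cons p rest ih =>
      intro d l
      simp only [List.foldl_cons, pvAStep]
      split_ifs with h1 h2
      · have hm : pvMatch pre p = some
            ((PySem.Int.ofStr? (PySem.List.pyGetD ((PySem.Str.splitMax? p.1 "-" 2).getD []) 1 "")).getD 0,
             PySem.List.pyGetD ((PySem.Str.splitMax? p.1 "-" 2).getD []) 2 "", p.2) := by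
          simp only [pvMatch, if_pos h1, if_pos h2]
        simp only [pvT, pvN, List.filterMap_cons, hm, Option.map_some, List.foldl_cons]
        rw [ih]
        simp only [pvGstep, pvT, pvN, List.append_assoc, List.singleton_append]
      · have hm : pvMatch pre p = none := by
          simp only [pvMatch, if_pos h1, if_neg h2]
        simp only [pvT, pvN, List.filterMap_cons, hm, Option.map_none]
        exact ih d l
      · have hm : pvMatch pre p = none := by
          simp only [pvMatch, if_neg h1]
        simp only [pvT, pvN, List.filterMap_cons, hm, Option.map_none]
        exact ih d l

theorem pvBfold (pre : String) (extras : List (String × String)) :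
    ∀ (a : List (Int × String × String)) (b : List String),
      extras.foldl (pvBStep pre) (a, b) = (a ++ pvT pre extras, b ++ pvN pre extras) := by
  induction extras with
  | nil => intro a b; simp [pvT, pvN]
  | cons p rest ih =>
      intro a b
      simp only [List.foldl_cons, pvBStep]
      split_ifs with h1 h2
      · have hm : pvMatch pre p = some
            ((PySem.Int.ofStr? (PySem.List.pyGetD ((PySem.Str.splitMax? p.1 "-" 2).getD []) 1 "")).getD 0,
             PySem.List.pyGetD ((PySem.Str.splitMax? p.1 "-" 2).getD []) 2 "", p.2) := by
          simp only [pvMatch, if_pos h1, if_pos h2]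
        simp only [pvT, pvN, List.filterMap_cons, hm, Option.map_some]
        rw [ih]
        simp only [pvT, pvN, List.append_assoc, List.singleton_append]
      · have hm : pvMatch pre p = none := by
          simp only [pvMatch, if_pos h1, if_neg h2]
        simp only [pvT, pvN, List.filterMap_cons, hm, Option.map_none]
        exact ih a b
      · have hm : pvMatch pre p = none := by
          simp only [pvMatch, if_neg h1]
        simp only [pvT, pvN, List.filterMap_cons, hm, Option.map_none]
        exact ih a b

theorem pvIdx_append (T : List (Int × String × String)) (x : Int × String × String) :
    pvIdx (T ++ [x]) = if (pvIdx T).contains x.1 then pvIdx T else pvIdx T ++ [x.1] := by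
  simp [pvIdx, List.foldl_append]

theorem mem_pvIdx (T : List (Int × String × String)) :
    ∀ j : Int, j ∈ pvIdx T ↔ j ∈ T.map Prod.fst := by
  induction T using List.reverseRecOn with
  | nil => simp [pvIdx]
  | append_singleton T x ih =>
      intro j
      rw [pvIdx_append]
      split_ifs with h
      · constructor
        · intro hj
          simp only [List.map_append, List.mem_append]
          exact Or.inl ((ih j).1 hj)
        · intro hj
          rw [List.map_append] at hj
          rcases List.mem_append.1 hj with h' | h'
          · exact (ih j).2 h'
          · simp only [List.map_cons, List.map_nil, List.mem_singleton] at h'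
            subst h'
            exact List.contains_iff_mem.1 h
      · simp only [List.mem_append, List.map_append, List.map_cons, List.map_nil,
          List.mem_singleton, ih j]

theorem nodup_pvIdx (T : List (Int × String × String)) : (pvIdx T).Nodup := by
  induction T using List.reverseRecOn with
  | nil => simp [pvIdx]
  | append_singleton T x ih =>
      rw [pvIdx_append]
      split_ifs with h
      · exact ih
      · have hx : x.1 ∉ pvIdx T := fun hmem => h (List.contains_iff_mem.2 hmem)
        simp only [List.nodup_append, List.nodup_cons, List.nodup_nil, List.not_mem_nil,
          not_false_iff, and_true, true_and]
        exact ⟨ih, by simpa using fun a ha (he : a = x.1) => hx (he ▸ ha)⟩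

theorem pvRow_append (i : Int) (T : List (Int × String × String)) (x : Int × String × String) :
    pvRow i (T ++ [x]) = if x.1 == i then (pvRow i T).insert x.2.1 x.2.2 else pvRow i T := by
  simp [pvRow, List.foldl_append]

theorem pvRow_empty_of_not_mem (i : Int) (T : List (Int × String × String))
    (h : ∀ t ∈ T, t.1 ≠ i) : pvRow i T = PySem.Dict.empty := by
  induction T with
  | nil => rfl
  | cons t rest ih =>
      have ht : t.1 ≠ i := h t (by simp)
      simp only [pvRow, List.foldl_cons, beq_iff_eq, if_neg ht] at *
      exact ih (fun u hu => h u (by simp [hu]))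

theorem pvG_eq (T : List (Int × String × String)) :
    T.foldl pvGstep PySem.Dict.empty = PySem.Dict.mk ((pvIdx T).map (fun i => (i, pvRow i T))) := by
  induction T using List.reverseRecOn with
  | nil => rfl
  | append_singleton T x ih =>
      obtain ⟨i, s, t⟩ := x
      rw [List.foldl_append, List.foldl_cons, List.foldl_nil, ih]
      have hkeys : (PySem.Dict.mk ((pvIdx T).map (fun j => (j, pvRow j T)))).keys = pvIdx T := by
        rw [PySem.Dict.keys_mk, List.map_map]
        exact List.map_id _
      have hnd : (PySem.Dict.mk ((pvIdx T).map (fun j => (j, pvRow j T)))).keys.Nodup := by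
        rw [hkeys]; exact nodup_pvIdx T
      by_cases hm : i ∈ pvIdx T
      · -- existing index: inner dict updated in place
        have hc : (PySem.Dict.mk ((pvIdx T).map (fun j => (j, pvRow j T)))).contains i = true :=
          (PySem.Dict.contains_iff_mem_keys _ _).2 (by rw [hkeys]; exact hm)
        have hmem : (i, pvRow i T) ∈ (PySem.Dict.mk ((pvIdx T).map (fun j => (j, pvRow j T)))).items :=
          List.mem_map.2 ⟨i, hm, rfl⟩
        have hget := PySem.Dict.get?_of_mem_items _ hmem hnd
        simp only [pvGstep, PySem.Dict.setdefault_of_contains _ _ hc, hget, Option.getD_some]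
        apply PySem.Dict.ext
        rw [PySem.Dict.items_insert_of_contains _ _ hc]
        have hIdx : pvIdx (T ++ [(i, s, t)]) = pvIdx T := by
          rw [pvIdx_append, if_pos (List.contains_iff_mem.2 hm)]
        rw [hIdx]
        show List.map _ (List.map (fun j => (j, pvRow j T)) (pvIdx T)) = _
        rw [List.map_map]
        apply List.map_congr_left
        intro j _
        by_cases hji : j = i
        · subst hji
          simp [Function.comp, pvRow_append]
        · simp [Function.comp, hji, pvRow_append, Ne.symm hji]
      · -- fresh index: appended at the end
        have hc : (PySem.Dict.mk ((pvIdx T).map (fun j => (j, pvRow j T)))).contains i = false := by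
          cases hb : (PySem.Dict.mk ((pvIdx T).map (fun j => (j, pvRow j T)))).contains i with
          | false => rfl
          | true => exact absurd (by
              have := (PySem.Dict.contains_iff_mem_keys _ _).1 hb
              rwa [hkeys] at this) hm
        have hrow : pvRow i T = PySem.Dict.empty := by
          apply pvRow_empty_of_not_mem
          intro u hu hui
          exact hm ((mem_pvIdx T i).2 (List.mem_map.2 ⟨u, hu, hui⟩))
        simp only [pvGstep, PySem.Dict.setdefault_of_not_contains _ _ hc,
          PySem.Dict.get?_insert_self, Option.getD_some]
        apply PySem.Dict.ext
        rw [PySem.Dict.items_insert_of_contains _ _ (PySem.Dict.contains_insert_self _ _ _),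
          PySem.Dict.items_insert_of_not_contains _ _ hc]
        have hIdx : pvIdx (T ++ [(i, s, t)]) = pvIdx T ++ [i] := by
          rw [pvIdx_append, if_neg (fun hcon => hm (List.contains_iff_mem.1 hcon))]
        rw [hIdx, List.map_append, List.map_append]
        congr 1
        · show List.map _ (List.map (fun j => (j, pvRow j T)) (pvIdx T)) = _
          rw [List.map_map]
          apply List.map_congr_left
          intro j hj
          have hji : j ≠ i := fun h' => hm (h' ▸ hj)
          simp [Function.comp, hji, pvRow_append, Ne.symm hji]
        · simp [pvRow_append, hrow]

theorem sorted_map_fst {g : Int → PySem.Dict String String} (l : List Int) (hnd : l.Nodup) :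
    PySem.List.sorted (l.map (fun i => (i, g i))) (fun kv => kv.1) false
      = (PySem.List.sorted l (fun x => x) false).map (fun i => (i, g i)) := by
  apply PySem.List.sorted_eq_of_perm_of_pairwise_lt
  · exact (PySem.List.sorted_perm l (fun x => x) false).map _
  · rw [List.pairwise_map]
    have hle : List.Pairwise (fun a b => a ≤ b) (PySem.List.sorted l (fun x => x) false) :=
      PySem.List.sorted_pairwise l (fun x => x)
    have hnd' : (PySem.List.sorted l (fun x => x) false).Nodup :=
      ((PySem.List.sorted_perm l (fun x => x) false).nodup_iff).2 hnd
    exact (hle.and hnd').imp (fun h => lt_of_le_of_ne h.1 h.2)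

-- ===== VERDICT (by name: the statement is the Claim_ definition above) =====
theorem parse_composite_from_extras_py_spec : Claim_equal_parse_composite_from_extras_py := by
  intro key data _ _
  unfold Spec_parse_composite_from_extras_py
  show parse_composite_from_extras_py key data = parse_composite_from_extras_py_alt key data
  simp only [parse_composite_from_extras_py, parse_composite_from_extras_py_alt]
  rw [pvAfold, pvBfold]
  have hIdxDef : ∀ L : List (Int × String × String),
      List.foldl (fun ix (t : Int × String × String) => if ix.contains t.1 then ix else ix ++ [t.1])
        ([] : List Int) L = pvIdx L := fun _ => rfl
  simp only [List.nil_append, hIdxDef, pvG_eq]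
  set T := pvT (pvPrefix key) (pvExtras key data) with hT
  have hnd := nodup_pvIdx T
  refine Prod.ext ?_ (Prod.ext ?_ rfl)
  · -- found: items of the grouped dict are B's list
    show ((PySem.Dict.mk ((pvIdx T).map (fun i => (i, pvRow i T)))).items).map
        (fun kv => (kv.1, kv.2.items)) = (pvIdx T).map (fun i => (i, (pvRow i T).items))
    show ((pvIdx T).map (fun i => (i, pvRow i T))).map (fun kv => (kv.1, kv.2.items)) = _
    rw [List.map_map]
    rfl
  · -- found_list
    show (PySem.List.sorted ((PySem.Dict.mk ((pvIdx T).map (fun i => (i, pvRow i T)))).items)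
        (fun kv => kv.1) false).map (fun kv => kv.2.items) = _
    have hitems : (PySem.Dict.mk ((pvIdx T).map (fun i => (i, pvRow i T)))).items
        = (pvIdx T).map (fun i => (i, pvRow i T)) := rfl
    rw [hitems, sorted_map_fst (pvIdx T) hnd, List.map_map]
    apply List.map_congr_left
    intro i hi
    have him : i ∈ pvIdx T := (PySem.List.mem_sorted _ _ _ _).1 hi
    have hget : (PySem.Dict.mk ((pvIdx T).map fun i => (i, (pvRow i T).items))).get? i
        = some ((pvRow i T).items) := by
      apply PySem.Dict.get?_of_mem_items
      · exact List.mem_map.2 ⟨i, him, rfl⟩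
      · have hcomp : ((fun x : Int × List (String × String) => x.1)
            ∘ fun i => (i, (pvRow i T).items)) = id := rfl
        rw [PySem.Dict.keys_mk, List.map_map, hcomp, List.map_id]
        exact hnd
    simp [Function.comp, hget]
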